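-- pv_equiv track=rewrite | github.com/nahcikeel/Algorithm | 프로그래머스/2/148653. 마법의 엘리베이터/마법의 엘리베이터.py | solution
-- ===== SOURCE A (Python) =====
-- def solution(storey):
--     click = 0
--
--     while storey>0:
--         digit = storey%10
--
--         # 올림
--         if digit > 5:
--             click += 10-digit
--             storey += 10
--
--         # 내림
--         elif digit < 5:
--             click += digit
--
--         # 다음 자리보고 결정
--         else:
--             if (storey//10)%10 >= 5:
--                 click += 5
--                 storey += 10
--             else:
--                 click += 5
--
--         storey //= 10
--
--     return click
-- ===== SOURCE B (Python) =====
-- def solution(storey):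
--     if storey <= 0:
--         return 0
--     if storey < 10:
--         return min(storey, 11 - storey)
--     d = storey % 10
--     return min(d + solution(storey // 10), 10 - d + solution(storey // 10 + 1))
-- ===== Notes on version B (the rewrite author's own statement) =====
-- stated objective: simpler
-- what changed: Replaces A's greedy digit loop with accumulator and its look-ahead at the next digit on the tie case by a direct recursion that takes the minimum of the two local choices (press down d times, or press up 10-d times and carry +1), with a closed-form base case for single-digit floors.
import Mathlib
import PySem

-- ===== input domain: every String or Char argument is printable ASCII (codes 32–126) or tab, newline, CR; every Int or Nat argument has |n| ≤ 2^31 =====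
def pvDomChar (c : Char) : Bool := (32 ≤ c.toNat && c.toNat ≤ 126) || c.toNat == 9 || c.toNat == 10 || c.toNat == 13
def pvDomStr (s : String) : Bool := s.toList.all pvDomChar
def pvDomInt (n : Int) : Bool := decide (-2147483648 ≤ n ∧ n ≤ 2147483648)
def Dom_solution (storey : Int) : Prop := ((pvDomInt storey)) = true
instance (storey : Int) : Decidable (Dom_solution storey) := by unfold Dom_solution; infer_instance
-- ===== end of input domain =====

-- B replaces A's greedy loop (with its tie-digit look-ahead) by a recursion taking the
-- minimum of the two local choices at each digit; objective: simpler.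

-- ===== PORT A =====
-- A's while loop, as recursion over (storey, click)
def solutionGo (storey click : Int) : Int :=
  if _h : 0 < storey then
    if 5 < PySem.Int.mod storey 10 then
      solutionGo (PySem.Int.floordiv (storey + 10) 10) (click + (10 - PySem.Int.mod storey 10))
    else if PySem.Int.mod storey 10 < 5 then
      solutionGo (PySem.Int.floordiv storey 10) (click + PySem.Int.mod storey 10)
    else
      if 5 ≤ PySem.Int.mod (PySem.Int.floordiv storey 10) 10 then
        solutionGo (PySem.Int.floordiv (storey + 10) 10) (click + 5)
      else
        solutionGo (PySem.Int.floordiv storey 10) (click + 5)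
  else click
termination_by storey.toNat
decreasing_by
  all_goals
    simp only [PySem.Int.floordiv_eq_ediv_of_pos (by norm_num : (0:Int) < 10),
      PySem.Int.mod_eq_emod_of_pos (by norm_num : (0:Int) < 10)] at *
  · omega
  · omega
  · omega
  · omega

def solution (storey : Int) : Int := solutionGo storey 0

-- ===== PORT B =====
def solution_alt (storey : Int) : Int :=
  if storey ≤ 0 then 0
  else if storey < 10 then min storey (11 - storey)
  else
    min (PySem.Int.mod storey 10 + solution_alt (PySem.Int.floordiv storey 10))
        (10 - PySem.Int.mod storey 10 + solution_alt (PySem.Int.floordiv storey 10 + 1))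
termination_by storey.toNat
decreasing_by
  all_goals
    simp only [PySem.Int.floordiv_eq_ediv_of_pos (by norm_num : (0:Int) < 10)] at *
  · omega
  · omega

-- ===== PRECONDITION & SPEC =====
def Spec_solution (storey : Int) (out : Int) : Prop := out = solution_alt storey
instance (storey : Int) (out : Int) : Decidable (Spec_solution storey out) := by unfold Spec_solution; infer_instance

-- ===== CLAIM (what is proved, stated in full; the proofs are below) =====
def Claim_equal_solution : Prop := ∀ (storey : Int), Dom_solution storey → Spec_solution storey (solution storey)

-- ===== LEMMAS AND PROOFS =====

theorem alt_zero : solution_alt 0 = 0 := by rw [solution_alt]; norm_num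

theorem alt_one : solution_alt 1 = 1 := by rw [solution_alt]; norm_num

-- solution_alt unfolds uniformly for any positive storey
theorem alt_pos (s : Int) (hs : 0 < s) :
    solution_alt s = min (s % 10 + solution_alt (s / 10)) (10 - s % 10 + solution_alt (s / 10 + 1)) := by
  rw [solution_alt]
  by_cases h10 : s < 10
  · have h0 : s / 10 = 0 := by omega
    have hm : s % 10 = s := by omega
    rw [if_neg (by omega : ¬ s ≤ 0), if_pos h10, h0, hm,
      (by norm_num : (0:Int) + 1 = 1), alt_zero, alt_one]
    omega
  · simp only [if_neg (by omega : ¬ s ≤ 0), if_neg h10,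
      PySem.Int.floordiv_eq_ediv_of_pos (by norm_num : (0:Int) < 10),
      PySem.Int.mod_eq_emod_of_pos (by norm_num : (0:Int) < 10)]

-- Lipschitz-and-direction lemma for solution_alt at consecutive arguments
theorem alt_step (q : Int) (hq : 0 ≤ q) :
    solution_alt q ≤ solution_alt (q + 1) + 1 ∧ solution_alt (q + 1) ≤ solution_alt q + 1 ∧
    (5 ≤ q % 10 → solution_alt (q + 1) ≤ solution_alt q) ∧
    (q % 10 < 5 → solution_alt q ≤ solution_alt (q + 1)) := by
  induction hn : q.toNat using Nat.strong_induction_on generalizing q with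
  | _ n ih =>
  by_cases h0 : q = 0
  · subst h0
    rw [alt_zero, (by norm_num : (0:Int) + 1 = 1), alt_one]
    omega
  have hqpos : 0 < q := by omega
  have hr : 0 ≤ q / 10 := by omega
  have ha := alt_pos q hqpos
  have hb := alt_pos (q + 1) (by omega)
  obtain ⟨i1, i2, -, -⟩ := ih (q / 10).toNat (by omega) (q / 10) hr rfl
  by_cases he : q % 10 ≤ 8
  · -- adding 1 does not carry
    rw [(by omega : (q + 1) % 10 = q % 10 + 1), (by omega : (q + 1) / 10 = q / 10)] at hb
    omega
  · -- q % 10 = 9 : carry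
    obtain ⟨j1, j2, -, -⟩ := ih (q / 10 + 1).toNat (by omega) (q / 10 + 1) (by omega) rfl
    rw [(by omega : (q + 1) % 10 = 0), (by omega : (q + 1) / 10 = q / 10 + 1)] at hb
    omega

-- A's loop computes click plus solution_alt of the remaining storey
theorem go_eq (s c : Int) : solutionGo s c = c + solution_alt s := by
  induction hn : s.toNat using Nat.strong_induction_on generalizing s c with
  | _ n ih =>
  by_cases hpos : 0 < s
  · rw [solutionGo]
    simp only [dif_pos hpos,
      PySem.Int.floordiv_eq_ediv_of_pos (by norm_num : (0:Int) < 10),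
      PySem.Int.mod_eq_emod_of_pos (by norm_num : (0:Int) < 10)]
    have hcarry : (s + 10) / 10 = s / 10 + 1 := by omega
    have halt := alt_pos s hpos
    obtain ⟨l1, l2, dir1, dir2⟩ := alt_step (s / 10) (by omega)
    by_cases h6 : 5 < s % 10
    · rw [if_pos h6, hcarry, ih (s / 10 + 1).toNat (by omega) _ _ rfl]
      omega
    · rw [if_neg h6]
      by_cases h4 : s % 10 < 5
      · rw [if_pos h4, ih (s / 10).toNat (by omega) _ _ rfl]
        omega
      · rw [if_neg h4]
        by_cases hnx : 5 ≤ (s / 10) % 10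
        · rw [if_pos hnx, hcarry, ih (s / 10 + 1).toNat (by omega) _ _ rfl]
          have := dir1 hnx
          omega
        · rw [if_neg hnx, ih (s / 10).toNat (by omega) _ _ rfl]
          have := dir2 (by omega)
          omega
  · rw [solutionGo, solution_alt]
    simp only [dif_neg hpos, if_pos (by omega : s ≤ 0)]
    omega

-- ===== VERDICT (by name: the statement is the Claim_ definition above) =====
theorem solution_spec : Claim_equal_solution := by
  intro storey _
  unfold Spec_solution solution
  rw [go_eq]
  omega
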